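-- pv_equiv track=rewrite | github.com/shhk-prog/SST-merge | sst_merge_v4/src/data_loader.py | _create_fallback_data
-- ===== SOURCE A (Python) =====
-- from typing import Optional, Dict, List, Tuple
--
-- def _create_fallback_data(max_samples: int) -> List[Dict]:
--     """フォールバック用のシンプルなQ&Aデータ"""
--     qa_pairs = [
--         ("What is the capital of France?", "The capital of France is Paris."),
--         ("Explain photosynthesis.", "Photosynthesis is the process by which plants convert sunlight into energy."),
--         ("What is machine learning?", "Machine learning is a subset of AI that enables systems to learn from data."),
--     ]
--
--     data = []
--     for i in range(min(max_samples, 100)):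
--         q, a = qa_pairs[i % len(qa_pairs)]
--         data.append({'prompt': q, 'response': a})
--
--     return data
-- ===== SOURCE B (Python) =====
-- def _create_fallback_data(max_samples):
--     """フォールバック用のシンプルなQ&Aデータ"""
--     qa_pairs = [
--         ("What is the capital of France?", "The capital of France is Paris."),
--         ("Explain photosynthesis.", "Photosynthesis is the process by which plants convert sunlight into energy."),
--         ("What is machine learning?", "Machine learning is a subset of AI that enables systems to learn from data."),
--     ]
--     n = max(0, min(max_samples, 100))
--     full = qa_pairs * (n // len(qa_pairs)) + qa_pairs[:n % len(qa_pairs)]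
--     return [{'prompt': q, 'response': a} for q, a in full]
-- ===== Notes on version B (the rewrite author's own statement) =====
-- stated objective: simpler
-- what changed: B replaces the per-iteration modulo-indexed loop with bulk construction: clamp n once, build the cyclic pair sequence as qa_pairs * (n // 3) + qa_pairs[:n % 3], then map it to dicts in one comprehension.
import Mathlib
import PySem

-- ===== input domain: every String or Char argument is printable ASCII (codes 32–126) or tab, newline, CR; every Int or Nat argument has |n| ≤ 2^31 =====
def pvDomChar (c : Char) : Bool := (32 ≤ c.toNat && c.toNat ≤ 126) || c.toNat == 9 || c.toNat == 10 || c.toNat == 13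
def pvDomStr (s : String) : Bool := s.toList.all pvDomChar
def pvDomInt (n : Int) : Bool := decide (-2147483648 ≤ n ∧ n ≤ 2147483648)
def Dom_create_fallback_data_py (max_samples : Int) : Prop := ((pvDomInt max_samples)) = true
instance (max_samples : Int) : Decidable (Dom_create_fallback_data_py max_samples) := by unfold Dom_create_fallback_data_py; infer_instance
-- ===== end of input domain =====

-- B builds the cyclic list by bulk repetition + slice instead of a per-iteration modulo-indexed loop (objective: simpler decomposition; return value proved equal for all inputs).


-- the shared literal qa_pairs list
def pvQaPairs : List (String × String) :=
  [("What is the capital of France?", "The capital of France is Paris."),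
   ("Explain photosynthesis.", "Photosynthesis is the process by which plants convert sunlight into energy."),
   ("What is machine learning?", "Machine learning is a subset of AI that enables systems to learn from data.")]

-- ===== PORT A =====
-- loop over range(min(max_samples, 100)); qa_pairs[i % 3] is always in range, so the
-- IndexError branch of pyGet? (none) never fires; .getD ("", "") only makes it total.
def create_fallback_data_py (max_samples : Int) : List (List (String × String)) :=
  (PySem.List.pyRange 0 (min max_samples 100) 1).foldl
    (fun data i =>
      let p := ((PySem.List.pyGet? pvQaPairs (PySem.Int.mod i (pvQaPairs.length : Int))).getD ("", ""))
      data ++ [[("prompt", p.1), ("response", p.2)]]) []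

-- ===== PORT B =====
def create_fallback_data_py_alt (max_samples : Int) : List (List (String × String)) :=
  let n : Int := max 0 (min max_samples 100)
  let full := (List.replicate (PySem.Int.floordiv n (pvQaPairs.length : Int)).toNat pvQaPairs).flatten
      ++ PySem.List.slice pvQaPairs none (some (PySem.Int.mod n (pvQaPairs.length : Int)))
  full.map (fun p => [("prompt", p.1), ("response", p.2)])

-- ===== PRECONDITION & SPEC =====
def Spec_create_fallback_data_py (max_samples : Int) (out : List (List (String × String))) : Prop := out = create_fallback_data_py_alt max_samples
instance (max_samples : Int) (out : List (List (String × String))) : Decidable (Spec_create_fallback_data_py max_samples out) := by unfold Spec_create_fallback_data_py; infer_instance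

-- ===== CLAIM (what is proved, stated in full; the proofs are below) =====
def Claim_equal_create_fallback_data_py : Prop := ∀ (max_samples : Int), Dom_create_fallback_data_py max_samples → Spec_create_fallback_data_py max_samples (create_fallback_data_py max_samples)

-- ===== LEMMAS AND PROOFS =====

theorem pv_foldl_append_map {α β : Type} (g : α → β) :
    ∀ (l : List α) (acc : List β),
      l.foldl (fun d i => d ++ [g i]) acc = acc ++ l.map g := by
  intro l
  induction l with
  | nil => simp
  | cons x xs ih => intro acc; simp [List.foldl, ih]

-- the purely-arithmetic heart: cycling a 3-element list n times = repeat + prefix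
theorem pv_cyc {α : Type} (a b c d : α) :
    ∀ n : Nat, (List.range n).map (fun k => [a, b, c].getD (k % 3) d)
      = (List.replicate (n / 3) [a, b, c]).flatten ++ [a, b, c].take (n % 3) := by
  intro n
  induction n with
  | zero => simp
  | succ n ih =>
    rw [List.range_succ, List.map_append, ih]
    have hr : n % 3 = 0 ∨ n % 3 = 1 ∨ n % 3 = 2 := by omega
    rcases hr with h | h | h
    · have h1 : (n + 1) / 3 = n / 3 := by omega
      have h2 : (n + 1) % 3 = 1 := by omega
      simp [h, h1, h2]
    · have h1 : (n + 1) / 3 = n / 3 := by omega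
      have h2 : (n + 1) % 3 = 2 := by omega
      simp [h, h1, h2]
    · have h1 : (n + 1) / 3 = n / 3 + 1 := by omega
      have h2 : (n + 1) % 3 = 0 := by omega
      simp [h, h1, h2, List.replicate_succ']

-- ===== VERDICT (by name: the statement is the Claim_ definition above) =====
theorem create_fallback_data_py_spec : Claim_equal_create_fallback_data_py := by
  intro ms _
  unfold Spec_create_fallback_data_py create_fallback_data_py create_fallback_data_py_alt
  simp only []
  have hlen : (pvQaPairs.length : Int) = ((3 : Nat) : Int) := rfl
  by_cases hpos : 0 < min ms 100
  · -- positive case: write min ms 100 as a natural-number cast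
    obtain ⟨n, hn⟩ : ∃ n : Nat, min ms 100 = (n : Int) :=
      ⟨(min ms 100).toNat, (Int.toNat_of_nonneg (le_of_lt hpos)).symm⟩
    have hmax : max 0 ((n : Nat) : Int) = ((n : Nat) : Int) := by omega
    rw [hn, hmax, hlen, PySem.Int.floordiv_natCast, PySem.Int.mod_natCast,
        Int.toNat_natCast, PySem.List.slice_to_natCast,
        PySem.List.pyRange_zero_natCast, pv_foldl_append_map, List.nil_append, List.map_map]
    have hpick : ∀ k : Nat,
        (fun i : Int =>
            [("prompt", ((PySem.List.pyGet? pvQaPairs (PySem.Int.mod i ((3:Nat) : Int))).getD ("", "")).1),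
             ("response", ((PySem.List.pyGet? pvQaPairs (PySem.Int.mod i ((3:Nat) : Int))).getD ("", "")).2)])
          ((k : Nat) : Int)
        = (fun q : String × String => [("prompt", q.1), ("response", q.2)])
            ([pvQaPairs.getD 0 ("",""), pvQaPairs.getD 1 ("",""),
              pvQaPairs.getD 2 ("","")].getD (k % 3) ("", "")) := by
      intro k
      have hr : k % 3 = 0 ∨ k % 3 = 1 ∨ k % 3 = 2 := by omega
      simp only [PySem.Int.mod_natCast]
      rcases hr with h | h | h <;> rw [h] <;> rfl
    calc (List.range n).map (fun k : Nat =>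
            (fun i : Int =>
              [("prompt", ((PySem.List.pyGet? pvQaPairs (PySem.Int.mod i ((3:Nat) : Int))).getD ("", "")).1),
               ("response", ((PySem.List.pyGet? pvQaPairs (PySem.Int.mod i ((3:Nat) : Int))).getD ("", "")).2)])
            ((k : Nat) : Int))
        = ((List.range n).map (fun k : Nat =>
            [pvQaPairs.getD 0 ("",""), pvQaPairs.getD 1 ("",""),
             pvQaPairs.getD 2 ("","")].getD (k % 3) ("", ""))).map
            (fun q : String × String => [("prompt", q.1), ("response", q.2)]) := by
          rw [List.map_map]
          exact List.map_congr_left (fun k _ => hpick k)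
      _ = ((List.replicate (n / 3) pvQaPairs).flatten ++ pvQaPairs.take (n % 3)).map
            (fun p : String × String => [("prompt", p.1), ("response", p.2)]) := by
          rw [pv_cyc (pvQaPairs.getD 0 ("","")) (pvQaPairs.getD 1 ("",""))
                (pvQaPairs.getD 2 ("","")) ("","") n]
          rfl
  · -- nonpositive case: the range is empty and n = 0
    have hmax : max 0 (min ms 100) = (0 : Int) := by omega
    rw [hmax]
    have hnil : PySem.List.pyRange 0 (min ms 100) 1 = [] := by
      simp [PySem.List.pyRange, hpos]
    rw [hnil]
    rfl
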